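-- pv_equiv track=rewrite | github.com/yihim/agentic_rag | agents/utils/vectorstore.py | clean_text_to_json
-- ===== SOURCE A (Python) =====
-- import string
--
-- def clean_text_to_json(text):
--     # Split the text into lines
--     lines = text.split("\n")
--
--     # Initialize variables
--     json_output = []
--     current_header = None
--     current_content = []
--     non_header_content = []
--
--     def clean_header(header):
--         # Remove the # symbol and any leading/trailing whitespace
--         header = header.replace("#", "").strip()
--         # Remove extra spaces and strip
--         header = " ".join(header.split())
--         return header
--
--     def process_current_group():
--         if current_header:
--             # Check if content ends with punctuation or contains .jpg
--             has_valid_content = any(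
--                 line.strip()[-1] in string.punctuation or ".jpg" in line
--                 for line in current_content
--             )
--
--             # Only add the group if there's content and it meets our criteria
--             if current_content and has_valid_content:
--                 json_output.append(
--                     {
--                         "header": clean_header(current_header),
--                         "content": "\n".join(current_content),
--                     }
--                 )
--             elif not current_content:
--                 # If header has no content, add it with empty content
--                 json_output.append(
--                     {"header": clean_header(current_header), "content": ""}
--                 )
--
--     # Process each line
--     for line in lines:
--         line = line.strip()
--         if not line:  # Skip empty lines
--             continue
--
--         # Check if line is a header
--         if line.startswith("#"):
--             # Process previous group before starting new one
--             process_current_group()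
--             # Start new group
--             current_header = line
--             current_content = []
--         else:
--             if current_header:
--                 # Add line to current header's content
--                 current_content.append(line)
--             else:
--                 # Add line to non-header content
--                 non_header_content.append(line)
--
--     # Process the last group
--     process_current_group()
--
--     # Add non-header content if it exists and has valid content
--     if non_header_content and any(
--         line.strip()[-1] in string.punctuation or ".jpg" in line
--         for line in non_header_content
--     ):
--         json_output.append({"header": "None", "content": "\n".join(non_header_content)})
--
--     # Convert to JSON with ensure_ascii=False to preserve Unicode characters
--     return json_output
-- ===== SOURCE B (Python) =====
-- import string
--
--
-- def clean_text_to_json(text):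
--     # Pass 0: normalise — stripped, non-empty lines only.
--     lines = [s for s in (raw.strip() for raw in text.split("\n")) if s]
--
--     def split_at_header(ls):
--         # (lines before the first header line, the rest starting at it)
--         for i, ln in enumerate(ls):
--             if ln.startswith("#"):
--                 return ls[:i], ls[i:]
--         return ls, []
--
--     # Pass 1: group — leading block, then (header, content-until-next-header) pairs.
--     lead, rest = split_at_header(lines)
--     groups = []
--     while rest:
--         head, tail = rest[0], rest[1:]
--         body, rest = split_at_header(tail)
--         groups.append((head, body))
--
--     def clean_header(header):
--         header = header.replace("#", "").strip()
--         return " ".join(header.split())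
--
--     def valid(block):
--         return any(
--             line.strip()[-1] in string.punctuation or ".jpg" in line
--             for line in block
--         )
--
--     # Pass 2: map each group to its output record.
--     out = []
--     for head, body in groups:
--         if not body:
--             out.append({"header": clean_header(head), "content": ""})
--         elif valid(body):
--             out.append({"header": clean_header(head), "content": "\n".join(body)})
--     if lead and valid(lead):
--         out.append({"header": "None", "content": "\n".join(lead)})
--     return out
-- ===== Notes on version B (the rewrite author's own statement) =====
-- stated objective: alternative
-- what changed: Replaces A's single accumulate-and-flush state machine (current_header/current_content flushed at each header and at EOF) with three separate passes: normalise lines, split them into a leading block plus explicit (header, body) groups, then map each group to its output record.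
import Mathlib
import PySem

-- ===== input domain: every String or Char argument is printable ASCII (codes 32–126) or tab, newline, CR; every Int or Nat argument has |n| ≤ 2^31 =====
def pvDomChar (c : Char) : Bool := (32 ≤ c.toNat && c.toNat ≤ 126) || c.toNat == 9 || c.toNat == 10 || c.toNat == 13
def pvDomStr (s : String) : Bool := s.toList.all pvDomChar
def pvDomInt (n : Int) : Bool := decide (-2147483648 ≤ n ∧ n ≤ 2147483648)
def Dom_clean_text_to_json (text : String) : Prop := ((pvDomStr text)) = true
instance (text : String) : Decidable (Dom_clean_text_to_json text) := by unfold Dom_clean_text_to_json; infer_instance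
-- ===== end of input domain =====

-- B replaces A's accumulate-and-flush state machine by three passes (normalise lines,
-- split into leading block + (header, body) groups, map groups to records); same cost,
-- different decomposition ("alternative"). Both return values only; no argument is mutated.

-- helpers shared by both ports (both Pythons use the same line criterion and header cleaner)
def pvPunct : String := "!\"#$%&'()*+,-./:;<=>?@[\\]^_`{|}~"

-- "line.strip()[-1] in string.punctuation or '.jpg' in line" (the [-1] never hits an
-- empty string on any reachable call; `none => false` is that unreachable arm)
def pvValidLine (line : String) : Bool :=
  (match PySem.Str.pyGet? (PySem.Str.strip line) (-1) with
   | some c => PySem.Str.isIn (String.ofList [c]) pvPunct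
   | none => false) || PySem.Str.isIn ".jpg" line

def pvValidBlock (block : List String) : Bool := block.any pvValidLine

def pvCleanHeader (header : String) : String :=
  let header := PySem.Str.strip (PySem.Str.replace header "#" "")
  PySem.Str.join " " (PySem.Str.split₀ header)

-- ===== PORT A =====
-- process_current_group(): Python's `if current_header:` is `some h` here — current_header
-- only ever holds a stripped line starting with '#', which is never the falsy "".
def pvFlushA (out : List (List (String × String))) (hdr? : Option String) (cc : List String) :
    List (List (String × String)) :=
  match hdr? with
  | none => out
  | some h =>
      if !cc.isEmpty && pvValidBlock cc then
        out ++ [[("header", pvCleanHeader h), ("content", PySem.Str.join "\n" cc)]]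
      else if cc.isEmpty then
        out ++ [[("header", pvCleanHeader h), ("content", "")]]
      else out

-- the loop body after `line = line.strip()` and the empty-line skip
def pvStepA' (st : List (List (String × String)) × Option String × List String × List String)
    (line : String) : List (List (String × String)) × Option String × List String × List String :=
  match st with
  | (out, hdr?, cc, nhc) =>
      if PySem.Str.startswith line "#" then
        (pvFlushA out hdr? cc, some line, [], nhc)
      else
        match hdr? with
        | some h => (out, some h, cc ++ [line], nhc)
        | none => (out, none, cc, nhc ++ [line])

def pvStepA (st : List (List (String × String)) × Option String × List String × List String)
    (raw : String) : List (List (String × String)) × Option String × List String × List String :=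
  let line := PySem.Str.strip raw
  if line == "" then st else pvStepA' st line

def clean_text_to_json (text : String) : List (List (String × String)) :=
  let lines := (PySem.Str.split? text "\n").getD [text]  -- split? is some: sep "\n" ≠ ""
  let st := lines.foldl pvStepA ([], none, [], [])
  let out := pvFlushA st.1 st.2.1 st.2.2.1
  let nhc := st.2.2.2
  if !nhc.isEmpty && pvValidBlock nhc then
    out ++ [[("header", "None"), ("content", PySem.Str.join "\n" nhc)]]
  else out

-- ===== PORT B =====
def pvIsHeader (ln : String) : Bool := PySem.Str.startswith ln "#"

-- split_at_header: one scan to the first header line = (takeWhile, dropWhile)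
def pvSplitAtHeader (ls : List String) : List String × List String :=
  (ls.takeWhile (fun ln => !pvIsHeader ln), ls.dropWhile (fun ln => !pvIsHeader ln))

def pvGroups : List String → List (String × List String)
  | [] => []
  | head :: tail =>
      (head, (pvSplitAtHeader tail).1) :: pvGroups (pvSplitAtHeader tail).2
  termination_by ls => ls.length
  decreasing_by
    simp only [pvSplitAtHeader, List.length_cons]
    exact Nat.lt_succ_of_le (List.length_dropWhile_le _ _)

-- pass 2, one group: zero or one output record
def pvEmitGroup (g : String × List String) : List (List (String × String)) :=
  if g.2.isEmpty then [[("header", pvCleanHeader g.1), ("content", "")]]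
  else if pvValidBlock g.2 then
    [[("header", pvCleanHeader g.1), ("content", PySem.Str.join "\n" g.2)]]
  else []

def clean_text_to_json_alt (text : String) : List (List (String × String)) :=
  let lines := (((PySem.Str.split? text "\n").getD [text]).map PySem.Str.strip).filter
      (fun s => !(s == ""))
  let lead := (pvSplitAtHeader lines).1
  let rest := (pvSplitAtHeader lines).2
  let out := (pvGroups rest).foldl (fun acc g => acc ++ pvEmitGroup g) []
  if !lead.isEmpty && pvValidBlock lead then
    out ++ [[("header", "None"), ("content", PySem.Str.join "\n" lead)]]
  else out

-- ===== PRECONDITION & SPEC =====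
def Spec_clean_text_to_json (text : String) (out : List (List (String × String))) : Prop := out = clean_text_to_json_alt text
instance (text : String) (out : List (List (String × String))) : Decidable (Spec_clean_text_to_json text out) := by unfold Spec_clean_text_to_json; infer_instance

-- ===== CLAIM (what is proved, stated in full; the proofs are below) =====
def Claim_equal_clean_text_to_json : Prop := ∀ (text : String), Dom_clean_text_to_json text → Spec_clean_text_to_json text (clean_text_to_json text)

-- ===== LEMMAS AND PROOFS =====

-- the "None"-record tail, as an appendable list
def pvTail (nhc : List String) : List (List (String × String)) :=
  if !nhc.isEmpty && pvValidBlock nhc then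
    [[("header", "None"), ("content", PySem.Str.join "\n" nhc)]]
  else []

-- A's epilogue applied to a loop state
def pvFinishA (st : List (List (String × String)) × Option String × List String × List String) :
    List (List (String × String)) :=
  pvFlushA st.1 st.2.1 st.2.2.1 ++ pvTail st.2.2.2

theorem pvGroups_nil : pvGroups [] = [] := by
  rw [pvGroups]

theorem pvGroups_cons (head : String) (tail : List String) :
    pvGroups (head :: tail) =
      (head, (pvSplitAtHeader tail).1) :: pvGroups (pvSplitAtHeader tail).2 := by
  rw [pvGroups]

theorem pvFlush_eq (out : List (List (String × String))) (h : String) (cc : List String) :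
    pvFlushA out (some h) cc = out ++ pvEmitGroup (h, cc) := by
  by_cases hc : cc.isEmpty <;> by_cases hv : pvValidBlock cc <;>
    simp [pvFlushA, pvEmitGroup, hc, hv]

theorem pvTail_append (out : List (List (String × String))) (nhc : List String) :
    (if !nhc.isEmpty && pvValidBlock nhc then
        out ++ [[("header", "None"), ("content", PySem.Str.join "\n" nhc)]]
      else out) = out ++ pvTail nhc := by
  by_cases h : !nhc.isEmpty && pvValidBlock nhc <;> simp [pvTail, h]

-- stripping + skipping inside A's loop = folding the stripless body over the cleaned lines
theorem pvFoldA_strip_filter (raws : List String)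
    (st : List (List (String × String)) × Option String × List String × List String) :
    raws.foldl pvStepA st =
      ((raws.map PySem.Str.strip).filter (fun s => !(s == ""))).foldl pvStepA' st := by
  induction raws generalizing st with
  | nil => rfl
  | cons r raws ih =>
      by_cases h : PySem.Str.strip r == "" <;>
        simp [pvStepA, h, ih]

-- header mode: the rest of the loop emits the open group, then one record per further group
theorem pvL1 (L : List String) : ∀ (out : List (List (String × String))) (h : String)
    (cc nhc : List String),
    pvFinishA (L.foldl pvStepA' (out, some h, cc, nhc))
      = out ++ pvEmitGroup (h, cc ++ L.takeWhile (fun ln => !pvIsHeader ln))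
          ++ (pvGroups (L.dropWhile (fun ln => !pvIsHeader ln))).flatMap pvEmitGroup
          ++ pvTail nhc := by
  induction L with
  | nil =>
      intro out h cc nhc
      simp [pvFinishA, pvFlush_eq, pvGroups_nil]
  | cons ln L ih =>
      intro out h cc nhc
      by_cases hh : pvIsHeader ln
      · have hs : PySem.Chars.startswith ln.toList ['#'] = true := by
          simpa using (hh : pvIsHeader ln = true)
        have hstep : pvStepA' (out, some h, cc, nhc) ln
            = (pvFlushA out (some h) cc, some ln, [], nhc) := by simp [pvStepA', hs]
        simp only [List.foldl_cons, hstep]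
        rw [ih, pvFlush_eq]
        simp [hh, pvGroups_cons, pvSplitAtHeader]
      · have hs : PySem.Chars.startswith ln.toList ['#'] = false := by
          simpa [pvIsHeader] using hh
        have hstep : pvStepA' (out, some h, cc, nhc) ln
            = (out, some h, cc ++ [ln], nhc) := by simp [pvStepA', hs]
        simp only [List.foldl_cons, hstep]
        rw [ih]
        simp [hh]

-- lead mode: before any header, non-empty lines pile up in non_header_content
theorem pvL0 (L : List String) : ∀ (nhc : List String),
    pvFinishA (L.foldl pvStepA' ([], none, [], nhc))
      = (pvGroups (L.dropWhile (fun ln => !pvIsHeader ln))).flatMap pvEmitGroup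
          ++ pvTail (nhc ++ L.takeWhile (fun ln => !pvIsHeader ln)) := by
  induction L with
  | nil =>
      intro nhc
      simp [pvFinishA, pvFlushA, pvGroups_nil]
  | cons ln L ih =>
      intro nhc
      by_cases hh : pvIsHeader ln
      · have hs : PySem.Chars.startswith ln.toList ['#'] = true := by
          simpa using (hh : pvIsHeader ln = true)
        have hstep : pvStepA' ([], none, [], nhc) ln
            = ([], some ln, [], nhc) := by simp [pvStepA', hs, pvFlushA]
        simp only [List.foldl_cons, hstep]
        rw [pvL1]
        simp [hh, pvGroups_cons, pvSplitAtHeader]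
      · have hs : PySem.Chars.startswith ln.toList ['#'] = false := by
          simpa [pvIsHeader] using hh
        have hstep : pvStepA' ([], none, [], nhc) ln
            = ([], none, [], nhc ++ [ln]) := by simp [pvStepA', hs]
        simp only [List.foldl_cons, hstep]
        rw [ih]
        simp [hh]

theorem pvA_char (text : String) :
    clean_text_to_json text =
      pvFinishA (((PySem.Str.split? text "\n").getD [text]).foldl pvStepA ([], none, [], [])) := by
  simp only [clean_text_to_json, pvFinishA]
  rw [pvTail_append]

theorem pvB_char (text : String) :
    clean_text_to_json_alt text =
      (pvGroups (((((PySem.Str.split? text "\n").getD [text]).map PySem.Str.strip).filter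
            (fun s => !(s == ""))).dropWhile (fun ln => !pvIsHeader ln))).flatMap pvEmitGroup
        ++ pvTail (((((PySem.Str.split? text "\n").getD [text]).map PySem.Str.strip).filter
            (fun s => !(s == ""))).takeWhile (fun ln => !pvIsHeader ln)) := by
  simp only [clean_text_to_json_alt, pvSplitAtHeader]
  rw [PySem.List.foldl_append_eq_flatMap, List.nil_append, pvTail_append]

-- ===== VERDICT (by name: the statement is the Claim_ definition above) =====
theorem clean_text_to_json_spec : Claim_equal_clean_text_to_json := by
  unfold Claim_equal_clean_text_to_json
  intro text _
  unfold Spec_clean_text_to_json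
  rw [pvA_char, pvFoldA_strip_filter, pvL0, pvB_char, List.nil_append]
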